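-- pv_equiv track=rewrite | github.com/VTaych/DS-A | Warmup/last_digit_of_the_sum_of_fibonacci_numbers_again.py | last_digit_of_fibonacci_number
-- ===== SOURCE A (Python) =====
-- def last_digit_of_fibonacci_number(n):
--     # if n < 2:
--     #     return n
--     previous, current = 0, 1
--     num = n % 60
--     if n <= 1:
--         return n
--
--     for i in range(2, num + 2):
--         previous, current = current, previous + current
--
--     return (previous * current) % 10
-- ===== SOURCE B (Python) =====
-- def last_digit_of_fibonacci_number(n):
--     if n <= 1:
--         return n
--     num = n % 60
--     total, a, b = 0, 0, 1
--     for i in range(num + 1):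
--         total += a * a
--         a, b = b, a + b
--     return total % 10
-- ===== Notes on version B (the rewrite author's own statement) =====
-- stated objective: alternative
-- what changed: B replaces A's closed-form product identity (product of the last two Fibonacci values) by a direct running summation of Fibonacci squares, maintaining a sum accumulator across the loop instead of multiplying two final values.
import Mathlib
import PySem

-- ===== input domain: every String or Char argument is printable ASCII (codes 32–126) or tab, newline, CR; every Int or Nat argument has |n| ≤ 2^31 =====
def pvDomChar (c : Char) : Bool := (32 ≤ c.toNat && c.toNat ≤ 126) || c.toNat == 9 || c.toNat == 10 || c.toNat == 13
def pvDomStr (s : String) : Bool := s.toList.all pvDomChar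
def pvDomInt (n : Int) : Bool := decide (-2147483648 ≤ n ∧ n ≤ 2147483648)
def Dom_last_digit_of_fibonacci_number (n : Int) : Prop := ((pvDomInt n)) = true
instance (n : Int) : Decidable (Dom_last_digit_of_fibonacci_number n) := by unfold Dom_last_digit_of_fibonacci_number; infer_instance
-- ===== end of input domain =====

-- B replaces A's closed-form product identity (product of the last two Fibonacci values)
-- by a direct running summation of Fibonacci squares (objective: alternative algorithm).

-- ===== PORT A =====
def last_digit_of_fibonacci_number (n : Int) : Int :=
  let previous : Int := 0
  let current : Int := 1
  let num := PySem.Int.mod n 60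
  if n ≤ 1 then n
  else
    let pc := (PySem.List.pyRange 2 (num + 2) 1).foldl
      (fun (pc : Int × Int) _ => (pc.2, pc.1 + pc.2)) (previous, current)
    PySem.Int.mod (pc.1 * pc.2) 10

-- ===== PORT B =====
def last_digit_of_fibonacci_number_alt (n : Int) : Int :=
  if n ≤ 1 then n
  else
    let num := PySem.Int.mod n 60
    let st := (PySem.List.pyRange 0 (num + 1) 1).foldl
      (fun (st : Int × Int × Int) _ => (st.1 + st.2.1 * st.2.1, st.2.2, st.2.1 + st.2.2))
      (0, 0, 1)
    PySem.Int.mod st.1 10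

-- ===== PRECONDITION & SPEC =====
def Spec_last_digit_of_fibonacci_number (n : Int) (out : Int) : Prop := out = last_digit_of_fibonacci_number_alt n
instance (n : Int) (out : Int) : Decidable (Spec_last_digit_of_fibonacci_number n out) := by unfold Spec_last_digit_of_fibonacci_number; infer_instance

-- ===== CLAIM (what is proved, stated in full; the proofs are below) =====
def Claim_equal_last_digit_of_fibonacci_number : Prop := ∀ (n : Int), Dom_last_digit_of_fibonacci_number n → Spec_last_digit_of_fibonacci_number n (last_digit_of_fibonacci_number n)

-- ===== LEMMAS AND PROOFS =====

-- A's loop body and B's loop body as step functions (the folds ignore the range element)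
def pvStepA (pc : Int × Int) : Int × Int := (pc.2, pc.1 + pc.2)
def pvStepB (st : Int × Int × Int) : Int × Int × Int :=
  (st.1 + st.2.1 * st.2.1, st.2.2, st.2.1 + st.2.2)

lemma pv_foldl_const {α β : Type} (f : α → α) (l : List β) (init : α) :
    l.foldl (fun s _ => f s) init = f^[l.length] init := by
  induction l generalizing init with
  | nil => rfl
  | cons x xs ih => simp [List.foldl_cons, ih, Function.iterate_succ_apply]

-- loop invariant: B's state after k steps is ((c-p)*p, p, c) where (p,c) is A's state
lemma pv_invariant (k : Nat) :
    pvStepB^[k] (0, 0, 1) =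
      (((pvStepA^[k] ((0 : Int), (1 : Int))).2 - (pvStepA^[k] ((0 : Int), (1 : Int))).1) *
        (pvStepA^[k] ((0 : Int), (1 : Int))).1,
       pvStepA^[k] ((0 : Int), (1 : Int))) := by
  induction k with
  | zero => simp
  | succ k ih =>
      rw [Function.iterate_succ_apply', Function.iterate_succ_apply', ih]
      simp [pvStepA, pvStepB]
      ring

theorem last_digit_of_fibonacci_number_spec_aux (n : Int) :
    last_digit_of_fibonacci_number n = last_digit_of_fibonacci_number_alt n := by
  by_cases h : n ≤ 1
  · simp [last_digit_of_fibonacci_number, last_digit_of_fibonacci_number_alt, h]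
  · have h0 : 0 ≤ PySem.Int.mod n 60 := PySem.Int.mod_nonneg n (by norm_num)
    set r := PySem.Int.mod n 60 with hr
    have hA : (fun (pc : Int × Int) (_ : Int) => (pc.2, pc.1 + pc.2)) =
        (fun (pc : Int × Int) (_ : Int) => pvStepA pc) := rfl
    have hB : (fun (st : Int × Int × Int) (_ : Int) =>
        (st.1 + st.2.1 * st.2.1, st.2.2, st.2.1 + st.2.2)) =
        (fun (st : Int × Int × Int) (_ : Int) => pvStepB st) := rfl
    have lA : (PySem.List.pyRange 2 (r + 2) 1).length = r.toNat := by
      rw [PySem.List.length_pyRange_one]; omega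
    have lB : (PySem.List.pyRange 0 (r + 1) 1).length = r.toNat + 1 := by
      rw [PySem.List.length_pyRange_one]; omega
    simp only [last_digit_of_fibonacci_number, last_digit_of_fibonacci_number_alt, ← hr,
      if_neg h, hA, hB, pv_foldl_const, lA, lB]
    rw [pv_invariant (r.toNat + 1), Function.iterate_succ_apply']
    set pc := pvStepA^[r.toNat] ((0 : Int), (1 : Int)) with hpc
    simp [pvStepA]

-- ===== VERDICT (by name: the statement is the Claim_ definition above) =====
theorem last_digit_of_fibonacci_number_spec : Claim_equal_last_digit_of_fibonacci_number := by
  intro n _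
  exact last_digit_of_fibonacci_number_spec_aux n
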